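-- pv_equiv track=rewrite | github.com/laol12/pinyin-converter | pinyin.py | add_tone
-- ===== SOURCE A (Python) =====
-- VOWELS = {'a', 'e', 'i', 'o', 'u', 'v'}
--
-- TONE_MARKS = {
--     'a': ['ā', 'á', 'ǎ', 'à'],
--     'e': ['ē', 'é', 'ě', 'è'],
--     'i': ['ī', 'í', 'ǐ', 'ì'],
--     'o': ['ō', 'ó', 'ǒ', 'ò'],
--     'u': ['ū', 'ú', 'ǔ', 'ù'],
--     'v': ['ǖ', 'ǘ', 'ǚ', 'ǜ']
-- }
--
-- def add_tone(token, tone):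
--     '''
--     Adds the appropriate tone to the given token.
--
--     :param token: one pinyin word
--     :param tone: corresponding tone to add
--     '''
--     vowel_order = {
--         'a':0,
--         'e':1,
--         'i':2,
--         'o':3,
--         'u':4,
--         'v':5
--     }
--
--     # tone 5 has no tone mark
--     if tone == 5:
--         contains_v = token.find('v')
--         if contains_v == -1:
--             return token
--         else:
--             return token[:contains_v] + 'ü' + token[contains_v+1:]
--
--     # find the vowel to be replaced (first vowel in order)
--     first_vowel = 'v'
--     argmax = -1
--     for i in range(len(token)):
--         c = token[i]
--         if c in VOWELS:
--             if vowel_order[c] <= vowel_order[first_vowel]: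
--                 first_vowel = c
--                 argmax = i
--
--     result = token[:argmax] + TONE_MARKS[first_vowel][tone - 1] + token[argmax+1:]
--     return result
-- ===== SOURCE B (Python) =====
-- VOWELS = {'a', 'e', 'i', 'o', 'u', 'v'}
--
-- TONE_MARKS = {
--     'a': ['ā', 'á', 'ǎ', 'à'],
--     'e': ['ē', 'é', 'ě', 'è'],
--     'i': ['ī', 'í', 'ǐ', 'ì'],
--     'o': ['ō', 'ó', 'ǒ', 'ò'],
--     'u': ['ū', 'ú', 'ǔ', 'ù'],
--     'v': ['ǖ', 'ǘ', 'ǚ', 'ǜ']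
-- }
--
-- def add_tone(token, tone):
--     # tone 5 has no tone mark
--     if tone == 5:
--         contains_v = token.find('v')
--         if contains_v == -1:
--             return token
--         return token[:contains_v] + 'ü' + token[contains_v + 1:]
--     # pick the highest-priority vowel present, at its last occurrence
--     chosen, idx = 'v', -1
--     for vowel in ('a', 'e', 'i', 'o', 'u', 'v'):
--         pos = token.rfind(vowel)
--         if pos != -1:
--             chosen, idx = vowel, pos
--             break
--     return token[:idx] + TONE_MARKS[chosen][tone - 1] + token[idx + 1:]
-- ===== Notes on version B (the rewrite author's own statement) =====
-- stated objective: idiomatic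
-- what changed: A's single positional scan tracking the minimal-vowel-order argmax is replaced by iterating over the fixed priority list ('a','e','i','o','u','v') with one token.rfind lookup per vowel and an early break at the first hit.
import Mathlib
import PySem

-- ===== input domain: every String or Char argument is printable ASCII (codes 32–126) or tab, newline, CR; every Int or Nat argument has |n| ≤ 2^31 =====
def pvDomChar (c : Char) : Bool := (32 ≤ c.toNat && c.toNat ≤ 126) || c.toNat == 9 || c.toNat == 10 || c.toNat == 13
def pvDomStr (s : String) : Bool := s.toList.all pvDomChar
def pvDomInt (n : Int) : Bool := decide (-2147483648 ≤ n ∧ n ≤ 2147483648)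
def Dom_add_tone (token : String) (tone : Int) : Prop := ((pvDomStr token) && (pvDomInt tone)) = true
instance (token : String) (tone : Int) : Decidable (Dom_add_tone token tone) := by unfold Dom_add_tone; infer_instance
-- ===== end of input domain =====

set_option maxRecDepth 8192


-- B replaces A's single positional argmax scan (tracking the minimal-order vowel seen so far)
-- by a priority-ordered sequence of rfind lookups with an early break: simpler/more idiomatic, same cost.

-- ===== PORT A =====
def pvVowels : PySem.Set Char := PySem.Set.ofList ['a', 'e', 'i', 'o', 'u', 'v']

def pvToneMarks : PySem.Dict Char (List Char) := PySem.Dict.mk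
  [('a', ['ā', 'á', 'ǎ', 'à']),
   ('e', ['ē', 'é', 'ě', 'è']),
   ('i', ['ī', 'í', 'ǐ', 'ì']),
   ('o', ['ō', 'ó', 'ǒ', 'ò']),
   ('u', ['ū', 'ú', 'ǔ', 'ù']),
   ('v', ['ǖ', 'ǘ', 'ǚ', 'ǜ'])]

def pvVowelOrder : PySem.Dict Char Int := PySem.Dict.mk
  [('a', 0), ('e', 1), ('i', 2), ('o', 3), ('u', 4), ('v', 5)]

-- loop body of A: `if c in VOWELS: if vowel_order[c] <= vowel_order[first_vowel]: ...`
def pvStepA (cs : List Char) (s : Char × Int) (i : Int) : Char × Int :=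
  let c := PySem.List.pyGetD cs i ' '
  if pvVowels.contains c then
    if PySem.Dict.getD pvVowelOrder c 0 ≤ PySem.Dict.getD pvVowelOrder s.1 0 then (c, i) else s
  else s

-- `for i in range(len(token)): ...` with state (first_vowel, argmax)
def pvFoldA (cs : List Char) : Char × Int :=
  List.foldl (pvStepA cs) ('v', -1) (PySem.List.pyRange 0 (PySem.List.len cs))

def add_tone (token : String) (tone : Int) : String :=
  if tone = 5 then
    let containsV := PySem.Str.find token "v"
    if containsV = -1 then token
    else String.mk (PySem.List.slice token.toList none (some containsV) ++ ['ü'] ++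
                    PySem.List.slice token.toList (some (containsV + 1)) none)
  else
    let st := pvFoldA token.toList
    match PySem.List.pyGet? (PySem.Dict.getD pvToneMarks st.1 []) (tone - 1) with
    | none => ""   -- Python raises IndexError here; excluded by Pre_add_tone
    | some m => String.mk (PySem.List.slice token.toList none (some st.2) ++ [m] ++
                           PySem.List.slice token.toList (some (st.2 + 1)) none)

-- ===== PORT B =====
-- `for vowel in ('a','e','i','o','u','v'): pos = token.rfind(vowel); if pos != -1: ...; break`
def pvPrio (cs : List Char) : List Char → Char × Int
  | [] => ('v', -1)
  | v :: rest =>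
    let pos := PySem.Chars.rfind cs [v]
    if pos ≠ -1 then (v, pos) else pvPrio cs rest

def add_tone_alt (token : String) (tone : Int) : String :=
  if tone = 5 then
    let containsV := PySem.Str.find token "v"
    if containsV = -1 then token
    else String.mk (PySem.List.slice token.toList none (some containsV) ++ ['ü'] ++
                    PySem.List.slice token.toList (some (containsV + 1)) none)
  else
    let st := pvPrio token.toList ['a', 'e', 'i', 'o', 'u', 'v']
    match PySem.List.pyGet? (PySem.Dict.getD pvToneMarks st.1 []) (tone - 1) with
    | none => ""   -- Python raises IndexError here; excluded by Pre_add_tone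
    | some m => String.mk (PySem.List.slice token.toList none (some st.2) ++ [m] ++
                           PySem.List.slice token.toList (some (st.2 + 1)) none)

-- ===== PRECONDITION & SPEC =====
-- Pre_ excludes exactly the tones on which A raises IndexError (TONE_MARKS[...][tone-1]
-- is out of range unless tone = 5 or -3 ≤ tone ≤ 4; Python indexes -4..3 wrap around).
def Pre_add_tone (token : String) (tone : Int) : Prop := tone = 5 ∨ (-3 ≤ tone ∧ tone ≤ 4)
instance (token : String) (tone : Int) : Decidable (Pre_add_tone token tone) := by
  unfold Pre_add_tone; infer_instance

def pvWitness_add_tone : String × Int := ("ma", 3)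

def Spec_add_tone (token : String) (tone : Int) (out : String) : Prop := out = add_tone_alt token tone
instance (token : String) (tone : Int) (out : String) : Decidable (Spec_add_tone token tone out) := by
  unfold Spec_add_tone; infer_instance

-- ===== CLAIM (what is proved, stated in full; the proofs are below) =====
def Claim_equal_add_tone : Prop := ∀ (token : String) (tone : Int), Dom_add_tone token tone →
  Pre_add_tone token tone → Spec_add_tone token tone (add_tone token tone)

-- ===== LEMMAS AND PROOFS =====

theorem pv_isPrefixOf_single_append (ds : List Char) (c v : Char) (h : c ≠ v) :
    [v].isPrefixOf (ds ++ [c]) = [v].isPrefixOf ds := by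
  cases ds with
  | nil => simp [List.isPrefixOf]; exact fun h' => h h'.symm
  | cons d t => simp [List.isPrefixOf]

theorem pv_rfind_go_succ (s sub : List Char) (j : Nat) :
    PySem.Chars.rfind.go s sub (j + 1) =
      if sub.isPrefixOf (s.drop (j + 1)) then ((j : Int) + 1) else PySem.Chars.rfind.go s sub j := by
  rw [PySem.Chars.rfind.go]; push_cast; rfl

theorem pv_rfind_go_zero (s sub : List Char) :
    PySem.Chars.rfind.go s sub 0 = if sub.isPrefixOf s then 0 else -1 := by
  rw [PySem.Chars.rfind.go]

theorem pv_rfind_go_append (ds : List Char) (c v : Char) (h : c ≠ v) :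
    ∀ k, k ≤ ds.length →
      PySem.Chars.rfind.go (ds ++ [c]) [v] k = PySem.Chars.rfind.go ds [v] k := by
  intro k
  induction k with
  | zero => intro _; rw [pv_rfind_go_zero, pv_rfind_go_zero, pv_isPrefixOf_single_append ds c v h]
  | succ j ih =>
    intro hk
    rw [pv_rfind_go_succ, pv_rfind_go_succ,
        List.drop_append_of_le_length (by omega),
        pv_isPrefixOf_single_append _ c v h, ih (by omega)]

theorem pv_drop_len_succ_append (ds : List Char) (c : Char) :
    (ds ++ [c]).drop (ds.length + 1) = [] := by
  apply List.drop_eq_nil_of_le; simp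

theorem pv_rfind_append_ne (ds : List Char) (c v : Char) (h : c ≠ v) :
    PySem.Chars.rfind (ds ++ [c]) [v] = PySem.Chars.rfind ds [v] := by
  show PySem.Chars.rfind.go (ds ++ [c]) [v] (ds ++ [c]).length = PySem.Chars.rfind.go ds [v] ds.length
  rw [List.length_append, List.length_singleton, pv_rfind_go_succ, pv_drop_len_succ_append]
  simp only [List.isPrefixOf, Bool.false_eq_true, if_false]
  exact pv_rfind_go_append ds c v h ds.length le_rfl

theorem pv_rfind_append_eq (ds : List Char) (v : Char) :
    PySem.Chars.rfind (ds ++ [v]) [v] = (ds.length : Int) := by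
  show PySem.Chars.rfind.go (ds ++ [v]) [v] (ds ++ [v]).length = (ds.length : Int)
  rw [List.length_append, List.length_singleton, pv_rfind_go_succ, pv_drop_len_succ_append]
  simp only [List.isPrefixOf, Bool.false_eq_true, if_false]
  cases hn : ds.length with
  | zero =>
    have : ds = [] := List.eq_nil_of_length_eq_zero hn
    subst this
    rw [pv_rfind_go_zero]
    simp [List.isPrefixOf]
  | succ j =>
    rw [pv_rfind_go_succ]
    have hd : (ds ++ [v]).drop (j + 1) = [v] := by
      rw [← hn, List.drop_append_of_le_length le_rfl, List.drop_length, List.nil_append]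
    rw [hd]
    simp [List.isPrefixOf]

-- pvPrio over an append: the new last char is not in the priority list
theorem pv_prio_append_not_mem (ds : List Char) (c : Char) :
    ∀ l : List Char, c ∉ l → pvPrio (ds ++ [c]) l = pvPrio ds l := by
  intro l
  induction l with
  | nil => intro _; rfl
  | cons v rest ih =>
    intro hc
    have hvc : c ≠ v := fun h => hc (by simp [h])
    simp only [pvPrio, pv_rfind_append_ne ds c v hvc]
    split
    · rfl
    · exact ih (fun h => hc (by simp [h]))

theorem pv_prio_append_hit (ds : List Char) (c : Char) :
    ∀ (l1 l2 : List Char), c ∉ l1 → (∀ v ∈ l1, PySem.Chars.rfind ds [v] = -1) →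
      pvPrio (ds ++ [c]) (l1 ++ c :: l2) = (c, (ds.length : Int)) := by
  intro l1
  induction l1 with
  | nil =>
    intro l2 _ _
    simp only [List.nil_append, pvPrio, pv_rfind_append_eq ds c]
    have : (ds.length : Int) ≠ -1 := by omega
    simp [this]
  | cons v rest ih =>
    intro l2 hc hall
    have hvc : c ≠ v := fun h => hc (by simp [h])
    simp only [List.cons_append, pvPrio, pv_rfind_append_ne ds c v hvc,
               hall v (by simp)]
    simp only [ne_eq, not_true_eq_false, if_false]
    exact ih l2 (fun h => hc (by simp [h])) (fun w hw => hall w (by simp [hw]))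

theorem pv_prio_append_miss (ds : List Char) (c : Char) :
    ∀ (l1 l2 : List Char) (v0 : Char), c ∉ l1 → v0 ∈ l1 → PySem.Chars.rfind ds [v0] ≠ -1 →
      pvPrio (ds ++ [c]) (l1 ++ c :: l2) = pvPrio ds (l1 ++ c :: l2) := by
  intro l1
  induction l1 with
  | nil => intro _ _ _ hv0; simp at hv0
  | cons v rest ih =>
    intro l2 v0 hc hv0 hne
    have hvc : c ≠ v := fun h => hc (by simp [h])
    simp only [List.cons_append, pvPrio, pv_rfind_append_ne ds c v hvc]
    by_cases hv : PySem.Chars.rfind ds [v] = -1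
    · simp only [hv, ne_eq, not_true_eq_false, if_false]
      have hv0' : v0 ∈ rest := by
        rcases List.mem_cons.mp hv0 with h | h
        · exact absurd (h ▸ hv) hne
        · exact h
      exact ih l2 v0 (fun h => hc (by simp [h])) hv0' hne
    · simp [hv]

def pvPrioList : List Char := ['a', 'e', 'i', 'o', 'u', 'v']

def pvOrd (c : Char) : Int := PySem.Dict.getD pvVowelOrder c 0

theorem pv_foldA_append (ds : List Char) (c : Char) :
    pvFoldA (ds ++ [c]) =
      if pvVowels.contains c then
        (if pvOrd c ≤ pvOrd (pvFoldA ds).1 then (c, (ds.length : Int)) else pvFoldA ds)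
      else pvFoldA ds := by
  have hlen : PySem.List.len (ds ++ [c]) = (ds.length : Int) + 1 := by
    simp [PySem.List.len]
  have h0 : (0:Int) ≤ (ds.length : Int) := by positivity
  have hcong : List.foldl (pvStepA (ds ++ [c])) ('v', -1)
      (PySem.List.pyRange 0 (ds.length : Int)) = pvFoldA ds := by
    unfold pvFoldA
    simp only [PySem.List.len]
    apply PySem.List.foldl_congr_mem
    intro acc i hi
    rcases PySem.List.mem_pyRange_one.mp hi with ⟨h0i, hin⟩
    unfold pvStepA
    have hg : PySem.List.pyGetD (ds ++ [c]) i ' ' = PySem.List.pyGetD ds i ' ' := by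
      rw [PySem.List.pyGetD_of_nonneg _ _ h0i, PySem.List.pyGetD_of_nonneg _ _ h0i]
      exact List.getD_append ds [c] ' ' i.toNat (by omega)
    rw [hg]
  have hstep : pvStepA (ds ++ [c]) (pvFoldA ds) (ds.length : Int) =
      if pvVowels.contains c then
        (if pvOrd c ≤ pvOrd (pvFoldA ds).1 then (c, (ds.length : Int)) else pvFoldA ds)
      else pvFoldA ds := by
    unfold pvStepA
    have hg : PySem.List.pyGetD (ds ++ [c]) (ds.length : Int) ' ' = c := by
      rw [PySem.List.pyGetD_of_nonneg _ _ h0]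
      simp [List.getD]
    rw [hg]
    rfl
  unfold pvFoldA
  rw [hlen, PySem.List.pyRange_one_succ_right h0, List.foldl_append]
  simp only [List.foldl_cons, List.foldl_nil]
  rw [hcong, hstep]
  rfl

theorem pv_contains_iff (c : Char) : pvVowels.contains c = true ↔ c ∈ pvPrioList := by
  simp [pvVowels, pvPrioList, PySem.Set.ofList]

-- the priority scan of ds ++ [c] hits c itself: every higher-priority vowel is absent
theorem pv_hit (ds : List Char) (c : Char) (l1 l2 : List Char)
    (hdec : pvPrioList = l1 ++ c :: l2) (hc1 : c ∉ l1)
    (hall1 : ∀ v ∈ l1, pvOrd v < pvOrd c)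
    (hle : pvOrd c ≤ pvOrd (pvFoldA ds).1)
    (ih3 : ∀ v ∈ pvPrioList, pvOrd v < pvOrd (pvFoldA ds).1 → PySem.Chars.rfind ds [v] = -1) :
    pvPrio (ds ++ [c]) pvPrioList = (c, (ds.length : Int)) := by
  rw [hdec]
  apply pv_prio_append_hit ds c l1 l2 hc1
  intro v hv
  exact ih3 v (by rw [hdec]; exact List.mem_append_left _ hv)
    (lt_of_lt_of_le (hall1 v hv) hle)

-- the priority scan of ds ++ [c] stops before reaching c, exactly where it stopped on ds
theorem pv_miss (ds : List Char) (c : Char) (l1 l2 : List Char)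
    (hdec : pvPrioList = l1 ++ c :: l2) (hc1 : c ∉ l1)
    (hmem1 : ∀ v ∈ pvPrioList, pvOrd v < pvOrd c → v ∈ l1)
    (hlt : pvOrd (pvFoldA ds).1 < pvOrd c)
    (ih2 : (pvFoldA ds).1 ∈ pvPrioList)
    (ih4 : (pvFoldA ds).1 ≠ 'v' → PySem.Chars.rfind ds [(pvFoldA ds).1] ≠ -1) :
    pvPrio (ds ++ [c]) pvPrioList = pvPrio ds pvPrioList := by
  have hcv : pvOrd c ≤ 5 := by
    have hc : c ∈ pvPrioList := by rw [hdec]; exact List.mem_append_right _ (by simp)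
    fin_cases hc <;> decide
  have hf1 : (pvFoldA ds).1 ≠ 'v' := by
    intro h
    rw [h] at hlt
    have : pvOrd 'v' = 5 := by decide
    omega
  rw [hdec]
  exact pv_prio_append_miss ds c l1 l2 (pvFoldA ds).1 hc1
    (hmem1 _ ih2 hlt) (ih4 hf1)

-- the core invariant: A's argmax fold equals B's priority scan; every vowel of
-- strictly smaller order than the current best is absent; a non-default best occurs
theorem pv_main (cs : List Char) :
    pvFoldA cs = pvPrio cs pvPrioList ∧
    (pvFoldA cs).1 ∈ pvPrioList ∧
    (∀ v ∈ pvPrioList, pvOrd v < pvOrd (pvFoldA cs).1 → PySem.Chars.rfind cs [v] = -1) ∧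
    ((pvFoldA cs).1 ≠ 'v' → PySem.Chars.rfind cs [(pvFoldA cs).1] ≠ -1) := by
  induction cs using List.reverseRecOn with
  | nil =>
    refine ⟨by decide, by decide, ?_, fun h => absurd rfl h⟩
    intro v hv _
    fin_cases hv <;> decide
  | append_singleton ds c ih =>
    obtain ⟨ih1, ih2, ih3, ih4⟩ := ih
    rw [pv_foldA_append]
    by_cases hv : pvVowels.contains c = true
    · have hc : c ∈ pvPrioList := (pv_contains_iff c).mp hv
      rw [if_pos hv]
      by_cases hle : pvOrd c ≤ pvOrd (pvFoldA ds).1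
      · rw [if_pos hle]
        have hPrio : pvPrio (ds ++ [c]) pvPrioList = (c, (ds.length : Int)) := by
          have hc' : c = 'a' ∨ c = 'e' ∨ c = 'i' ∨ c = 'o' ∨ c = 'u' ∨ c = 'v' := by
            simpa [pvPrioList] using hc
          rcases hc' with rfl | rfl | rfl | rfl | rfl | rfl
          · exact pv_hit ds 'a' [] ['e', 'i', 'o', 'u', 'v'] rfl (by decide) (by intro v hv; fin_cases hv) hle ih3
          · exact pv_hit ds 'e' ['a'] ['i', 'o', 'u', 'v'] rfl (by decide) (by intro v hv; fin_cases hv <;> decide) hle ih3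
          · exact pv_hit ds 'i' ['a', 'e'] ['o', 'u', 'v'] rfl (by decide) (by intro v hv; fin_cases hv <;> decide) hle ih3
          · exact pv_hit ds 'o' ['a', 'e', 'i'] ['u', 'v'] rfl (by decide) (by intro v hv; fin_cases hv <;> decide) hle ih3
          · exact pv_hit ds 'u' ['a', 'e', 'i', 'o'] ['v'] rfl (by decide) (by intro v hv; fin_cases hv <;> decide) hle ih3
          · exact pv_hit ds 'v' ['a', 'e', 'i', 'o', 'u'] [] rfl (by decide) (by intro v hv; fin_cases hv <;> decide) hle ih3
        refine ⟨hPrio.symm, hc, ?_, ?_⟩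
        · intro w hw hwlt
          have hcw : c ≠ w := by
            intro h; rw [h] at hwlt; exact lt_irrefl _ hwlt
          rw [pv_rfind_append_ne ds c w hcw]
          exact ih3 w hw (lt_of_lt_of_le hwlt hle)
        · intro _
          rw [pv_rfind_append_eq ds c]
          omega
      · rw [if_neg hle]
        rw [not_le] at hle
        have hPrio : pvPrio (ds ++ [c]) pvPrioList = pvPrio ds pvPrioList := by
          have hc' : c = 'a' ∨ c = 'e' ∨ c = 'i' ∨ c = 'o' ∨ c = 'u' ∨ c = 'v' := by
            simpa [pvPrioList] using hc
          rcases hc' with rfl | rfl | rfl | rfl | rfl | rfl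
          · exact pv_miss ds 'a' [] ['e', 'i', 'o', 'u', 'v'] rfl (by decide) (by intro v hv hvlt; fin_cases hv <;> revert hvlt <;> decide) hle ih2 ih4
          · exact pv_miss ds 'e' ['a'] ['i', 'o', 'u', 'v'] rfl (by decide) (by intro v hv hvlt; fin_cases hv <;> revert hvlt <;> decide) hle ih2 ih4
          · exact pv_miss ds 'i' ['a', 'e'] ['o', 'u', 'v'] rfl (by decide) (by intro v hv hvlt; fin_cases hv <;> revert hvlt <;> decide) hle ih2 ih4
          · exact pv_miss ds 'o' ['a', 'e', 'i'] ['u', 'v'] rfl (by decide) (by intro v hv hvlt; fin_cases hv <;> revert hvlt <;> decide) hle ih2 ih4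
          · exact pv_miss ds 'u' ['a', 'e', 'i', 'o'] ['v'] rfl (by decide) (by intro v hv hvlt; fin_cases hv <;> revert hvlt <;> decide) hle ih2 ih4
          · exact pv_miss ds 'v' ['a', 'e', 'i', 'o', 'u'] [] rfl (by decide) (by intro v hv hvlt; fin_cases hv <;> revert hvlt <;> decide) hle ih2 ih4
        refine ⟨hPrio ▸ ih1, ih2, ?_, ?_⟩
        · intro w hw hwlt
          have hcw : c ≠ w := by
            intro h; rw [← h] at hwlt; omega
          rw [pv_rfind_append_ne ds c w hcw]
          exact ih3 w hw hwlt
        · intro h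
          have hcf : c ≠ (pvFoldA ds).1 := by
            intro he; rw [← he] at hle; exact lt_irrefl _ hle
          rw [pv_rfind_append_ne ds c _ hcf]
          exact ih4 h
    · rw [if_neg hv]
      have hcnot : c ∉ pvPrioList := fun h => hv ((pv_contains_iff c).mpr h)
      refine ⟨?_, ih2, ?_, ?_⟩
      · rw [pv_prio_append_not_mem ds c pvPrioList hcnot]
        exact ih1
      · intro w hw hwlt
        have hcw : c ≠ w := fun h => hcnot (h ▸ hw)
        rw [pv_rfind_append_ne ds c w hcw]
        exact ih3 w hw hwlt
      · intro h
        have hcf : c ≠ (pvFoldA ds).1 := fun he => hcnot (he ▸ ih2)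
        rw [pv_rfind_append_ne ds c _ hcf]
        exact ih4 h

-- ===== VERDICT (by name: the statement is the Claim_ definition above) =====
theorem add_tone_spec : Claim_equal_add_tone := by
  intro token tone _ _
  unfold Spec_add_tone
  by_cases h5 : tone = 5
  · simp [add_tone, add_tone_alt, h5]
  · simp only [add_tone, add_tone_alt, h5, if_false]
    rw [(pv_main token.toList).1]
    rfl
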